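-- pv_equiv track=rewrite | github.com/jwu2019/synthesia-translator | main.py | GetNotes
-- ===== SOURCE A (Python) =====
-- def GetNotes(frame, noteRow, keyGroups, noteBuffer, noteYRange, noteThreshold):
--     noteArray = [False] * 88 # Tracks whether key is active on current frame
--
--     # Sets value of noteArray
--     for keyGroupNum in range(len(keyGroups)):
--         notePressed=True
--         for i in range(noteRow,noteRow+noteYRange):
--             for j in range(keyGroups[keyGroupNum][0]+noteBuffer,keyGroups[keyGroupNum][1]+1-noteBuffer):
--                 if frame[i][j]<noteThreshold:
--                     notePressed = False
--                     break
--         if notePressed: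
--             noteArray[keyGroupNum]=True
--             # Attempts to fix overlapping keys
--             if keyGroupNum>=2 and noteArray[keyGroupNum-1] and noteArray[keyGroupNum-2]:
--                 noteArray[keyGroupNum-1]=False
--     return noteArray
-- ===== SOURCE B (Python) =====
-- def GetNotes(frame, noteRow, keyGroups, noteBuffer, noteYRange, noteThreshold):
--     # Detection: one boolean per key group (short-circuiting generator).
--     pressed = [
--         all(frame[i][j] >= noteThreshold
--             for i in range(noteRow, noteRow + noteYRange)
--             for j in range(g[0] + noteBuffer, g[1] + 1 - noteBuffer))
--         for g in keyGroups
--     ]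
--     # Resolution, closed form: within each maximal run of pressed groups the
--     # surviving keys are those at odd streak (even offset from the run start)
--     # and the run's last key.  No retro-active clearing needed.
--     n = len(pressed)
--     noteArray = [False] * 88
--     streak = 0
--     for m in range(n):
--         streak = streak + 1 if pressed[m] else 0
--         if pressed[m] and (streak % 2 == 1 or m + 1 == n or not pressed[m + 1]):
--             noteArray[m] = True
--     return noteArray
-- ===== Notes on version B (the rewrite author's own statement) =====
-- stated objective: alternative
-- what changed: B replaces A's stateful set-then-retract conflict resolution (which mutates earlier array entries) by a closed-form rule: it tracks the streak of consecutive pressed groups and writes each key's final value directly - a key survives iff its streak is odd or it ends its run - after a separate detection pass.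
import Mathlib
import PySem

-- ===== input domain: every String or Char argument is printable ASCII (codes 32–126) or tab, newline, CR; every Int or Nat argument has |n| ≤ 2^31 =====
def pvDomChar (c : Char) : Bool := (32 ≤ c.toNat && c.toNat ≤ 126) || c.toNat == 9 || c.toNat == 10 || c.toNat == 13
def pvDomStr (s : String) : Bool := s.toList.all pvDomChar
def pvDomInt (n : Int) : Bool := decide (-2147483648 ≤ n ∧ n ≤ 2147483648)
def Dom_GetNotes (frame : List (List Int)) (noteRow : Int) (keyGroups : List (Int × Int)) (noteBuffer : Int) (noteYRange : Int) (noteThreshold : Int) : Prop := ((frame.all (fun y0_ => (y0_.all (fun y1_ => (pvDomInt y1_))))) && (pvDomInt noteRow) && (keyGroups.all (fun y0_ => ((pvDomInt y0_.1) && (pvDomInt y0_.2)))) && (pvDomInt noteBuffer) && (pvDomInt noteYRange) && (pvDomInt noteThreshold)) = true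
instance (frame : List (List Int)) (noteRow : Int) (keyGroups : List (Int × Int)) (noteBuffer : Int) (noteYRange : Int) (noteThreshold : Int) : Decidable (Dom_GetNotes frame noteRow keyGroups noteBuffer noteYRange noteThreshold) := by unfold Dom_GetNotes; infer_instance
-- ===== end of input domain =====

-- B replaces A's set-then-retract conflict resolution by a closed-form streak-parity rule
-- (a key survives iff its streak of consecutive pressed groups is odd or it ends its run);
-- return values agree on Pre_.

-- ===== PORT A =====
-- transliteration of A: for each keyGroupNum, scan rows/columns with the inner `break`
-- modelled as a (notePressed, broken) state, then update noteArray in place.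
def GetNotes (frame : List (List Int)) (noteRow : Int) (keyGroups : List (Int × Int)) (noteBuffer : Int) (noteYRange : Int) (noteThreshold : Int) : List Bool :=
  (PySem.List.pyRange 0 keyGroups.length 1).foldl (fun noteArray keyGroupNum =>
    -- notePressed after the i/j loops (inner break = (notePressed, broken) state):
    if (PySem.List.pyRange noteRow (noteRow + noteYRange) 1).foldl (fun notePressed i =>
        ((PySem.List.pyRange ((PySem.List.pyGetD keyGroups keyGroupNum (0, 0)).1 + noteBuffer)
            ((PySem.List.pyGetD keyGroups keyGroupNum (0, 0)).2 + 1 - noteBuffer) 1).foldl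
          (fun (st : Bool × Bool) j =>
            if st.2 then st            -- already broken out of the j-loop
            else if PySem.List.pyGetD (PySem.List.pyGetD frame i []) j 0 < noteThreshold then
              (false, true)            -- notePressed = False; break
            else st)
          (notePressed, false)).1) true
    then
      let noteArray := PySem.List.pySetD noteArray keyGroupNum true
      if decide (2 ≤ keyGroupNum) && PySem.List.pyGetD noteArray (keyGroupNum - 1) false
          && PySem.List.pyGetD noteArray (keyGroupNum - 2) false then
        PySem.List.pySetD noteArray (keyGroupNum - 1) false
      else noteArray
    else noteArray) (List.replicate 88 false)

-- ===== PORT B =====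
-- 'all(frame[i][j] >= noteThreshold for i in … for j in …)' for one key group g
def pvPressed (frame : List (List Int)) (noteRow : Int) (noteBuffer : Int) (noteYRange : Int) (noteThreshold : Int) (g : Int × Int) : Bool :=
  (PySem.List.pyRange noteRow (noteRow + noteYRange) 1).all (fun i =>
    (PySem.List.pyRange (g.1 + noteBuffer) (g.2 + 1 - noteBuffer) 1).all (fun j =>
      PySem.List.pyGetD (PySem.List.pyGetD frame i []) j 0 ≥ noteThreshold))

-- one iteration of Source B's resolution loop: state = (noteArray, streak)
def pvStepB (P : List Bool) (st : List Bool × Int) (m : Int) : List Bool × Int :=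
  let p := PySem.List.pyGetD P m false
  let streak : Int := if p then st.2 + 1 else 0
  (if p && (decide (PySem.Int.mod streak 2 = 1) || decide (m + 1 = (P.length : Int))
        || !PySem.List.pyGetD P (m + 1) false)
   then PySem.List.pySetD st.1 m true else st.1, streak)

def GetNotes_alt (frame : List (List Int)) (noteRow : Int) (keyGroups : List (Int × Int)) (noteBuffer : Int) (noteYRange : Int) (noteThreshold : Int) : List Bool :=
  let pressed := keyGroups.map (pvPressed frame noteRow noteBuffer noteYRange noteThreshold)
  ((PySem.List.pyRange 0 (pressed.length : Int) 1).foldl (pvStepB pressed)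
    (List.replicate 88 false, 0)).1

-- ===== PRECONDITION & SPEC =====
-- Pre_ is exactly the set of inputs on which Python A returns (no IndexError), stated in closed
-- form: at most 88 key groups, and for every key group with a nonempty column range, every scanned
-- row index is in frame bounds and every scanned column index is in row bounds up to the first
-- below-threshold pixel (the scan breaks there).  The only narrowing: more than 88 key groups is
-- always excluded, though A still returns when every group past the 88th is unpressed.
def Pre_GetNotes (frame : List (List Int)) (noteRow : Int) (keyGroups : List (Int × Int)) (noteBuffer : Int) (noteYRange : Int) (noteThreshold : Int) : Prop :=
  keyGroups.length ≤ 88 ∧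
  ∀ g ∈ keyGroups,
    g.2 + 1 - noteBuffer ≤ g.1 + noteBuffer ∨
    ((noteYRange ≤ 0 ∨ (-(frame.length : Int) ≤ noteRow ∧ noteRow + noteYRange ≤ (frame.length : Int))) ∧
     ∀ i ∈ PySem.List.pyRange noteRow (noteRow + noteYRange) 1,
       -(((PySem.List.pyGetD frame i []).length : Int)) ≤ g.1 + noteBuffer ∧
       (g.2 + 1 - noteBuffer ≤ ((PySem.List.pyGetD frame i []).length : Int) ∨
        ∃ j ∈ PySem.List.pyRange (g.1 + noteBuffer) ((PySem.List.pyGetD frame i []).length : Int) 1,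
          PySem.List.pyGetD (PySem.List.pyGetD frame i []) j 0 < noteThreshold))
instance (frame : List (List Int)) (noteRow : Int) (keyGroups : List (Int × Int)) (noteBuffer : Int) (noteYRange : Int) (noteThreshold : Int) : Decidable (Pre_GetNotes frame noteRow keyGroups noteBuffer noteYRange noteThreshold) := by unfold Pre_GetNotes; infer_instance

def pvWitness_GetNotes : List (List Int) × Int × (List (Int × Int)) × Int × Int × Int :=
  ([[5, 5, 0], [5, 5, 5]], 0, [(0, 1), (1, 2)], 0, 2, 1)

def Spec_GetNotes (frame : List (List Int)) (noteRow : Int) (keyGroups : List (Int × Int)) (noteBuffer : Int) (noteYRange : Int) (noteThreshold : Int) (out : List Bool) : Prop := out = GetNotes_alt frame noteRow keyGroups noteBuffer noteYRange noteThreshold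
instance (frame : List (List Int)) (noteRow : Int) (keyGroups : List (Int × Int)) (noteBuffer : Int) (noteYRange : Int) (noteThreshold : Int) (out : List Bool) : Decidable (Spec_GetNotes frame noteRow keyGroups noteBuffer noteYRange noteThreshold out) := by unfold Spec_GetNotes; infer_instance

-- ===== CLAIM =====
def Claim_equal_GetNotes : Prop := ∀ (frame : List (List Int)) (noteRow : Int) (keyGroups : List (Int × Int)) (noteBuffer : Int) (noteYRange : Int) (noteThreshold : Int), Dom_GetNotes frame noteRow keyGroups noteBuffer noteYRange noteThreshold → Pre_GetNotes frame noteRow keyGroups noteBuffer noteYRange noteThreshold → Spec_GetNotes frame noteRow keyGroups noteBuffer noteYRange noteThreshold (GetNotes frame noteRow keyGroups noteBuffer noteYRange noteThreshold)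

-- ===== LEMMAS AND PROOFS =====

-- one iteration of A's resolution (detection already replaced by the precomputed P)
def pvStepA (P : List Bool) (a : List Bool) (k : Int) : List Bool :=
  if PySem.List.pyGetD P k false then
    let a1 := PySem.List.pySetD a k true
    if decide (2 ≤ k) && PySem.List.pyGetD a1 (k - 1) false
        && PySem.List.pyGetD a1 (k - 2) false then
      PySem.List.pySetD a1 (k - 1) false
    else a1
  else a

-- streak of consecutive pressed groups ending just before index t
def pvSt (P : List Bool) : Nat → Nat
  | 0 => 0
  | t + 1 => if P.getD t false then pvSt P t + 1 else 0

-- the final value of key idx, closed form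
def pvSpec (P : List Bool) (idx : Nat) : Bool :=
  P.getD idx false && (decide (pvSt P (idx + 1) % 2 = 1) || decide (idx + 1 = P.length)
    || !P.getD (idx + 1) false)

-- once the break flag is set, the j-fold is stuck
theorem pv_break_stuck (l : List Int) (bad : Int → Prop) [DecidablePred bad] (x : Bool) :
    l.foldl (fun (st : Bool × Bool) j =>
      if st.2 then st else if bad j then (false, true) else st) (x, true) = (x, true) := by
  induction l with
  | nil => rfl
  | cons c cs ih => simpa using ih

-- value of A's inner j-loop: initial flag && all pixels good
theorem pv_break_fold (l : List Int) (bad : Int → Prop) [DecidablePred bad] (np : Bool) :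
    (l.foldl (fun (st : Bool × Bool) j =>
      if st.2 then st else if bad j then (false, true) else st) (np, false)).1
      = (np && l.all (fun j => !decide (bad j))) := by
  induction l generalizing np with
  | nil => simp
  | cons c cs ih =>
    by_cases h : bad c
    · simp [List.foldl_cons, h, pv_break_stuck]
    · simp [List.foldl_cons, h, ih]

-- folding && over a list is List.all
theorem pv_foldl_and (l : List Int) (f : Int → Bool) (b : Bool) :
    l.foldl (fun acc i => acc && f i) b = (b && l.all f) := by
  induction l generalizing b with
  | nil => simp
  | cons c cs ih => simp [List.foldl_cons, ih, Bool.and_assoc]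

-- A's per-group double loop computes pvPressed
theorem pv_pressed_eq (frame : List (List Int)) (noteRow noteBuffer noteYRange noteThreshold : Int)
    (g : Int × Int) :
    ((PySem.List.pyRange noteRow (noteRow + noteYRange) 1).foldl (fun notePressed i =>
        ((PySem.List.pyRange (g.1 + noteBuffer) (g.2 + 1 - noteBuffer) 1).foldl
          (fun (st : Bool × Bool) j =>
            if st.2 then st
            else if PySem.List.pyGetD (PySem.List.pyGetD frame i []) j 0 < noteThreshold then
              (false, true)
            else st)
          (notePressed, false)).1) true)
      = pvPressed frame noteRow noteBuffer noteYRange noteThreshold g := by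
  have hrow : ∀ np i, ((PySem.List.pyRange (g.1 + noteBuffer) (g.2 + 1 - noteBuffer) 1).foldl
      (fun (st : Bool × Bool) j =>
        if st.2 then st
        else if PySem.List.pyGetD (PySem.List.pyGetD frame i []) j 0 < noteThreshold then
          (false, true)
        else st) (np, false)).1
      = (np && (PySem.List.pyRange (g.1 + noteBuffer) (g.2 + 1 - noteBuffer) 1).all
          (fun j => PySem.List.pyGetD (PySem.List.pyGetD frame i []) j 0 ≥ noteThreshold)) := by
    intro np i
    rw [pv_break_fold (bad := fun j => PySem.List.pyGetD (PySem.List.pyGetD frame i []) j 0 < noteThreshold)]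
    have hpt : ∀ x : Int, (!decide (x < noteThreshold)) = decide (x ≥ noteThreshold) := by
      intro x
      simp only [ge_iff_le, ← decide_not, decide_eq_decide]
      exact not_lt
    simp only [hpt]
  simp only [hrow]
  rw [pv_foldl_and]
  simp [pvPressed]

-- A's whole loop is the fold of pvStepA over the precomputed pressed list
theorem pv_A_as_fold (frame : List (List Int)) (noteRow : Int) (keyGroups : List (Int × Int))
    (noteBuffer : Int) (noteYRange : Int) (noteThreshold : Int) :
    GetNotes frame noteRow keyGroups noteBuffer noteYRange noteThreshold
      = (PySem.List.pyRange 0 ((keyGroups.map (pvPressed frame noteRow noteBuffer noteYRange noteThreshold)).length : Int) 1).foldl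
          (pvStepA (keyGroups.map (pvPressed frame noteRow noteBuffer noteYRange noteThreshold)))
          (List.replicate 88 false) := by
  unfold GetNotes
  simp only [List.length_map]
  apply PySem.List.foldl_congr_mem
  intro acc k hk
  rw [PySem.List.mem_pyRange_one] at hk
  rw [pv_pressed_eq]
  unfold pvStepA
  rw [PySem.List.pyGetD_eq_getElem keyGroups (0, 0) hk.1 hk.2,
      PySem.List.pyGetD_eq_getElem
        (keyGroups.map (pvPressed frame noteRow noteBuffer noteYRange noteThreshold)) false hk.1
        (by simpa using hk.2)]
  simp

-- replicate reads as false everywhere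
theorem pv_getD_repl (i : Nat) : (List.replicate 88 false).getD i false = false := by
  rcases lt_or_ge i 88 with h | h
  · exact List.getD_replicate _ h
  · rw [List.getD_eq_getElem?_getD, List.getElem?_eq_none (by simpa using h)]; rfl

theorem pv_getD_set_self (l : List Bool) (t : Nat) (h : t < l.length) (v : Bool) :
    (l.set t v).getD t false = v := by
  rw [List.getD_eq_getElem?_getD, List.getElem?_set_self h]; rfl

theorem pv_getD_set_ne (l : List Bool) (t i : Nat) (h : i ≠ t) (v : Bool) :
    (l.set t v).getD i false = l.getD i false := by
  rw [List.getD_eq_getElem?_getD, List.getElem?_set_ne (by omega : t ≠ i), ← List.getD_eq_getElem?_getD]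

theorem pvSt_succ (P : List Bool) (u : Nat) :
    pvSt P (u + 1) = if P.getD u false then pvSt P u + 1 else 0 := rfl

theorem pvSpec_def (P : List Bool) (idx : Nat) :
    pvSpec P idx = (P.getD idx false && (decide (pvSt P (idx + 1) % 2 = 1)
      || decide (idx + 1 = P.length) || !P.getD (idx + 1) false)) := rfl

theorem pv_inv (P : List Bool) (hn : P.length ≤ 88) (t : Nat) : t ≤ P.length →
    ((PySem.List.pyRange 0 (t : Int) 1).foldl (pvStepA P) (List.replicate 88 false)).length = 88 ∧
    ((PySem.List.pyRange 0 (t : Int) 1).foldl (pvStepB P) (List.replicate 88 false, 0)).1.length = 88 ∧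
    ((PySem.List.pyRange 0 (t : Int) 1).foldl (pvStepB P) (List.replicate 88 false, 0)).2 = (pvSt P t : Int) ∧
    (∀ idx : Nat, idx < 88 →
      ((PySem.List.pyRange 0 (t : Int) 1).foldl (pvStepB P) (List.replicate 88 false, 0)).1.getD idx false
        = (decide (idx < t) && pvSpec P idx)) ∧
    (∀ idx : Nat, idx < 88 →
      ((PySem.List.pyRange 0 (t : Int) 1).foldl (pvStepA P) (List.replicate 88 false)).getD idx false
        = if t ≠ 0 ∧ idx = t - 1 then P.getD idx false
          else (decide (idx < t) && pvSpec P idx)) := by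
  induction t with
  | zero =>
    intro _
    simp only [Nat.cast_zero, PySem.List.pyRange_one_eq_nil le_rfl, List.foldl_nil]
    refine ⟨by simp, by simp, by simp [pvSt], ?_, ?_⟩
    · intro idx _; rw [pv_getD_repl]; simp
    · intro idx _; rw [pv_getD_repl]; simp
  | succ t ih =>
    intro ht
    obtain ⟨ha, hb, hs, hB, hA⟩ := ih (by omega)
    have hsplit : PySem.List.pyRange 0 ((t + 1 : Nat) : Int) 1
        = PySem.List.pyRange 0 (t : Int) 1 ++ [(t : Int)] := by
      have hc : ((t + 1 : Nat) : Int) = (t : Int) + 1 := by push_cast; ring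
      rw [hc, PySem.List.pyRange_one_succ_right (a := 0) (b := (t : Int)) (by omega)]
    simp only [hsplit, List.foldl_append, List.foldl_cons, List.foldl_nil]
    set a := (PySem.List.pyRange 0 (t : Int) 1).foldl (pvStepA P) (List.replicate 88 false) with hadef
    set bs := (PySem.List.pyRange 0 (t : Int) 1).foldl (pvStepB P) (List.replicate 88 false, 0) with hbsdef
    clear hadef hbsdef
    have ht88 : t < 88 := by omega
    have hpt : PySem.List.pyGetD P (t : Int) false = P.getD t false := by
      rw [PySem.List.pyGetD_natCast]
    have hpt1 : PySem.List.pyGetD P ((t : Int) + 1) false = P.getD (t + 1) false := by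
      rw [show (t : Int) + 1 = ((t + 1 : Nat) : Int) by push_cast; ring, PySem.List.pyGetD_natCast]
    have hlen : decide ((t : Int) + 1 = (P.length : Int)) = decide (t + 1 = P.length) := by
      rw [decide_eq_decide]; omega
    by_cases hp : P.getD t false
    · -- group t is pressed
      have hs1 : pvSt P (t + 1) = pvSt P t + 1 := by rw [pvSt_succ, if_pos hp]
      have hstB : pvStepB P bs (t : Int)
          = (if pvSpec P t then bs.1.set t true else bs.1, (pvSt P (t + 1) : Int)) := by
        have hmod : decide (PySem.Int.mod (((pvSt P t + 1 : Nat)) : Int) 2 = 1)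
            = decide ((pvSt P t + 1) % 2 = 1) := by
          rw [decide_eq_decide, PySem.Int.mod_eq_emod_of_pos (by omega)]; omega
        simp only [pvStepB, hpt, hpt1, hp, if_true, hs, hlen]
        rw [show (pvSt P t : Int) + 1 = ((pvSt P t + 1 : Nat) : Int) by push_cast; ring, hmod]
        have hcond : (true && (decide ((pvSt P t + 1) % 2 = 1) || decide (t + 1 = P.length)
            || !P.getD (t + 1) false)) = pvSpec P t := by
          rw [Bool.true_and, pvSpec_def, hp, Bool.true_and, hs1]
        rw [hcond, PySem.List.pySetD_natCast, hs1]
      have hBlen : (if pvSpec P t then bs.1.set t true else bs.1).length = 88 := by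
        by_cases hspec : pvSpec P t
        · rw [if_pos hspec, List.length_set]; exact hb
        · rw [if_neg hspec]; exact hb
      have hBpart : ∀ idx : Nat, idx < 88 →
          (if pvSpec P t then bs.1.set t true else bs.1).getD idx false
            = (decide (idx < t + 1) && pvSpec P idx) := by
        intro idx hi
        by_cases hit : idx = t
        · rw [hit, show decide (t < t + 1) = true from decide_eq_true (by omega), Bool.true_and]
          by_cases hspec : pvSpec P t
          · rw [if_pos hspec, pv_getD_set_self _ _ (by rw [hb]; omega) true, hspec]
          · rw [if_neg hspec, hB t ht88, show decide (t < t) = false from decide_eq_false (by omega),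
              Bool.false_and]
            simp [hspec]
        · have hdec : decide (idx < t + 1) = decide (idx < t) := by rw [decide_eq_decide]; omega
          by_cases hspec : pvSpec P t
          · rw [if_pos hspec, pv_getD_set_ne _ _ _ hit, hB idx hi, hdec]
          · rw [if_neg hspec, hB idx hi, hdec]
      by_cases ht2 : 2 ≤ t
      · -- t ≥ 2: A may retract key t-1
        have hc1 : (t : Int) - 1 = ((t - 1 : Nat) : Int) := by omega
        have hc2 : (t : Int) - 2 = ((t - 2 : Nat) : Int) := by omega
        have h1 : PySem.List.pyGetD (PySem.List.pySetD a (t : Int) true) ((t : Int) - 1) false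
            = P.getD (t - 1) false := by
          rw [PySem.List.pySetD_natCast, hc1, PySem.List.pyGetD_natCast,
            pv_getD_set_ne a t (t - 1) (by omega) true, hA (t - 1) (by omega),
            if_pos (show t ≠ 0 ∧ t - 1 = t - 1 by omega)]
        have h2 : PySem.List.pyGetD (PySem.List.pySetD a (t : Int) true) ((t : Int) - 2) false
            = pvSpec P (t - 2) := by
          rw [PySem.List.pySetD_natCast, hc2, PySem.List.pyGetD_natCast,
            pv_getD_set_ne a t (t - 2) (by omega) true, hA (t - 2) (by omega),
            if_neg (show ¬(t ≠ 0 ∧ t - 2 = t - 1) by omega),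
            show decide (t - 2 < t) = true from decide_eq_true (by omega), Bool.true_and]
        have hstA : pvStepA P a (t : Int)
            = if P.getD (t - 1) false && pvSpec P (t - 2)
              then (a.set t true).set (t - 1) false else a.set t true := by
          simp only [pvStepA, hpt, hp, if_true, h1, h2]
          rw [show decide ((2 : Int) ≤ (t : Int)) = true from decide_eq_true (by omega),
            Bool.true_and, PySem.List.pySetD_natCast, hc1, PySem.List.pySetD_natCast]
        rw [hstA, hstB]
        refine ⟨?_, hBlen, rfl, hBpart, ?_⟩
        · by_cases hca : P.getD (t - 1) false && pvSpec P (t - 2)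
          · rw [if_pos hca, List.length_set, List.length_set]; exact ha
          · rw [if_neg hca, List.length_set]; exact ha
        · intro idx hi
          by_cases hit : idx = t
          · rw [hit, if_pos (show t + 1 ≠ 0 ∧ t = t + 1 - 1 by omega), hp]
            by_cases hca : P.getD (t - 1) false && pvSpec P (t - 2)
            · rw [if_pos hca, pv_getD_set_ne _ _ _ (by omega),
                pv_getD_set_self _ _ (by rw [ha]; omega)]
            · rw [if_neg hca, pv_getD_set_self _ _ (by rw [ha]; omega)]
          · rw [if_neg (show ¬(t + 1 ≠ 0 ∧ idx = t + 1 - 1) by omega)]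
            by_cases hit1 : idx = t - 1
            · -- the retracted (or kept) key: parity argument
              have he : t - 1 + 1 = t := by omega
              have hrhs : (decide (idx < t + 1) && pvSpec P idx)
                  = (P.getD (t - 1) false && decide (pvSt P t % 2 = 1)) := by
                rw [hit1, show decide (t - 1 < t + 1) = true from decide_eq_true (by omega),
                  Bool.true_and, pvSpec_def, he,
                  show decide (t = P.length) = false from decide_eq_false (by omega), hp]
                simp
              rw [hrhs, hit1]
              by_cases hq : P.getD (t - 1) false
              · have hst : pvSt P t = pvSt P (t - 1) + 1 := by
                  have h := pvSt_succ P (t - 1); rw [he, if_pos hq] at h; exact h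
                have hsp2 : pvSpec P (t - 2) = (P.getD (t - 2) false
                    && decide (pvSt P (t - 1) % 2 = 1)) := by
                  rw [pvSpec_def, show t - 2 + 1 = t - 1 by omega,
                    show decide (t - 1 = P.length) = false from decide_eq_false (by omega), hq]
                  simp
                have hst2 : pvSt P (t - 1) = if P.getD (t - 2) false
                    then pvSt P (t - 2) + 1 else 0 := by
                  have h := pvSt_succ P (t - 2); rw [show t - 2 + 1 = t - 1 by omega] at h
                  exact h
                by_cases hpar : pvSt P (t - 1) % 2 = 1
                · have hr : P.getD (t - 2) false = true := by
                    cases hP2 : P.getD (t - 2) false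
                    · rw [hP2, if_neg (by simp)] at hst2; omega
                    · rfl
                  rw [if_pos (show (P.getD (t - 1) false && pvSpec P (t - 2)) = true by
                        rw [hq, Bool.true_and, hsp2, hr, Bool.true_and]; exact decide_eq_true hpar),
                    pv_getD_set_self _ _ (by rw [List.length_set, ha]; omega),
                    hq, Bool.true_and, hst,
                    show decide ((pvSt P (t - 1) + 1) % 2 = 1) = false from decide_eq_false (by omega)]
                · rw [if_neg (show ¬(P.getD (t - 1) false && pvSpec P (t - 2)) = true by
                        rw [hq, Bool.true_and, hsp2]; simp [hpar]),
                    pv_getD_set_ne _ _ _ (by omega), hA (t - 1) (by omega),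
                    if_pos (show t ≠ 0 ∧ t - 1 = t - 1 by omega), hq, Bool.true_and, hst,
                    show decide ((pvSt P (t - 1) + 1) % 2 = 1) = true from decide_eq_true (by omega)]
              · have hq' : P.getD (t - 1) false = false := by simpa using hq
                rw [if_neg (show ¬(P.getD (t - 1) false && pvSpec P (t - 2)) = true by
                      rw [hq']; simp), pv_getD_set_ne _ _ _ (by omega),
                  hA (t - 1) (by omega), if_pos (show t ≠ 0 ∧ t - 1 = t - 1 by omega), hq']
                simp
            · -- untouched keys
              have hgoal : a.getD idx false = (decide (idx < t + 1) && pvSpec P idx) := by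
                rw [hA idx hi, if_neg (show ¬(t ≠ 0 ∧ idx = t - 1) by omega),
                  show decide (idx < t + 1) = decide (idx < t) by rw [decide_eq_decide]; omega]
              by_cases hca : P.getD (t - 1) false && pvSpec P (t - 2)
              · rw [if_pos hca, pv_getD_set_ne _ _ _ (by omega),
                  pv_getD_set_ne _ _ _ hit, hgoal]
              · rw [if_neg hca, pv_getD_set_ne _ _ _ hit, hgoal]
      · -- t ≤ 1: the retraction guard 2 ≤ t is false
        have hstA : pvStepA P a (t : Int) = a.set t true := by
          simp only [pvStepA, hpt, hp, if_true]
          rw [show decide ((2 : Int) ≤ (t : Int)) = false from decide_eq_false (by omega)]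
          simp only [Bool.false_and, Bool.false_eq_true, if_false, PySem.List.pySetD_natCast]
        rw [hstA, hstB]
        refine ⟨by rw [List.length_set]; exact ha, hBlen, rfl, hBpart, ?_⟩
        intro idx hi
        by_cases hit : idx = t
        · rw [hit, if_pos (show t + 1 ≠ 0 ∧ t = t + 1 - 1 by omega), hp,
            pv_getD_set_self _ _ (by rw [ha]; omega)]
        · rw [if_neg (show ¬(t + 1 ≠ 0 ∧ idx = t + 1 - 1) by omega),
            pv_getD_set_ne _ _ _ hit, hA idx hi]
          have ht01 : t = 0 ∨ t = 1 := by omega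
          rcases ht01 with h0 | h1
          · rw [if_neg (by omega), show decide (idx < t) = false from decide_eq_false (by omega),
              show decide (idx < t + 1) = false from decide_eq_false (by omega)]
          · by_cases hi0 : idx = 0
            · rw [hi0, if_pos (show t ≠ 0 ∧ (0 : Nat) = t - 1 by omega),
                show decide ((0 : Nat) < t + 1) = true from decide_eq_true (by omega),
                Bool.true_and, pvSpec_def, pvSt_succ,
                show decide ((0 : Nat) + 1 = P.length) = false from decide_eq_false (by omega),
                show (0 : Nat) + 1 = t by omega, hp]
              cases hq : P.getD 0 false
              · simp
              · simp [pvSt]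
            · rw [if_neg (by omega), show decide (idx < t) = false from decide_eq_false (by omega),
                show decide (idx < t + 1) = false from decide_eq_false (by omega)]
    · -- group t is not pressed
      have hp' : P.getD t false = false := by simpa using hp
      have hp2 : P[t]?.getD false = false := hp'
      have hstA : pvStepA P a (t : Int) = a := by simp [pvStepA, hpt, hp2]
      have hstB : pvStepB P bs (t : Int) = (bs.1, 0) := by simp [pvStepB, hpt, hp2]
      rw [hstA, hstB]
      refine ⟨ha, hb, by rw [pvSt_succ, if_neg (by simp [hp2]), Nat.cast_zero], ?_, ?_⟩
      · intro idx hi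
        rw [hB idx hi]
        by_cases hit : idx = t
        · rw [hit, pvSpec_def, hp']; simp
        · rw [show decide (idx < t + 1) = decide (idx < t) by rw [decide_eq_decide]; omega]
      · intro idx hi
        rw [hA idx hi]
        by_cases hit : idx = t
        · rw [hit, if_neg (show ¬(t ≠ 0 ∧ t = t - 1) by omega),
            if_pos (show t + 1 ≠ 0 ∧ t = t + 1 - 1 by omega), hp',
            show decide (t < t) = false from decide_eq_false (by omega)]
          simp
        · by_cases hit1 : t ≠ 0 ∧ idx = t - 1
          · rw [if_pos hit1, if_neg (show ¬(t + 1 ≠ 0 ∧ idx = t + 1 - 1) by omega),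
              show decide (idx < t + 1) = true from decide_eq_true (by omega), Bool.true_and,
              pvSpec_def, show idx + 1 = t by omega, hp']
            simp
          · rw [if_neg hit1, if_neg (show ¬(t + 1 ≠ 0 ∧ idx = t + 1 - 1) by omega),
              show decide (idx < t + 1) = decide (idx < t) by rw [decide_eq_decide]; omega]

theorem GetNotes_eq_alt (frame : List (List Int)) (noteRow : Int) (keyGroups : List (Int × Int))
    (noteBuffer : Int) (noteYRange : Int) (noteThreshold : Int)
    (h88 : keyGroups.length ≤ 88) :
    GetNotes frame noteRow keyGroups noteBuffer noteYRange noteThreshold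
      = GetNotes_alt frame noteRow keyGroups noteBuffer noteYRange noteThreshold := by
  have hP : (keyGroups.map (pvPressed frame noteRow noteBuffer noteYRange noteThreshold)).length ≤ 88 := by
    simpa using h88
  obtain ⟨ha, hb, -, hB, hA⟩ := pv_inv
    (keyGroups.map (pvPressed frame noteRow noteBuffer noteYRange noteThreshold)) hP
    (keyGroups.map (pvPressed frame noteRow noteBuffer noteYRange noteThreshold)).length le_rfl
  rw [pv_A_as_fold]
  simp only [GetNotes_alt]
  set P := keyGroups.map (pvPressed frame noteRow noteBuffer noteYRange noteThreshold) with hPdef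
  clear hPdef
  apply List.ext_getElem (by rw [ha, hb])
  intro i h1 h2
  rw [← List.getD_eq_getElem _ false h1, ← List.getD_eq_getElem _ false h2,
    hA i (by omega), hB i (by omega)]
  by_cases hc : P.length ≠ 0 ∧ i = P.length - 1
  · rw [if_pos hc, decide_eq_true (by omega : i < P.length), Bool.true_and, pvSpec_def,
      show i + 1 = P.length by omega]
    simp
  · rw [if_neg hc]

-- ===== VERDICT =====
theorem GetNotes_spec : Claim_equal_GetNotes := by
  intro frame noteRow keyGroups noteBuffer noteYRange noteThreshold _ hpre
  unfold Spec_GetNotes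
  exact GetNotes_eq_alt frame noteRow keyGroups noteBuffer noteYRange noteThreshold hpre.1
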